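-- pv_equiv track=rewrite | github.com/tiger-tooth/Aha-Algorithm | 栈-回文.py | solve
-- ===== SOURCE A (Python) =====
-- def  solve(S,T):
--     zistr = [S[i:i+len(T)] for i in range(0, len(S)-len(T)+1)]
--     query = {}
--     [query.__setitem__(k, None) for k in T if k not in query.keys()]
--     ans = []
--     for ss in zistr:
--         ssx = []
--         [ssx.append(x) for x in ss if x not in ssx]
--         if len(ssx) == len(set(T)):
--             for i, k in enumerate(query.keys()):
--                 query[k] = ssx[i]
--         else:
--             continue
--         new = ''.join([query[x] for x in T])
--         ans.append(1) if ss==new else ans.append(0)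
--     return sum(ans)
-- ===== SOURCE B (Python) =====
-- def solve(S, T):
--     def pattern(s):
--         seen = []
--         out = []
--         for c in s:
--             if c not in seen:
--                 seen.append(c)
--             out.append(seen.index(c))
--         return out
--     m = len(T)
--     pt = pattern(T)
--     return sum(1 if pattern(S[i:i + m]) == pt else 0 for i in range(len(S) - m + 1))
-- ===== Notes on version B (the rewrite author's own statement) =====
-- stated objective: alternative
-- what changed: B precomputes T's first-occurrence index pattern once and compares each window's pattern to it, instead of re-deduplicating T, reassigning a char-translation dict and rebuilding a translated copy of T for every window as A does.
import Mathlib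
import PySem

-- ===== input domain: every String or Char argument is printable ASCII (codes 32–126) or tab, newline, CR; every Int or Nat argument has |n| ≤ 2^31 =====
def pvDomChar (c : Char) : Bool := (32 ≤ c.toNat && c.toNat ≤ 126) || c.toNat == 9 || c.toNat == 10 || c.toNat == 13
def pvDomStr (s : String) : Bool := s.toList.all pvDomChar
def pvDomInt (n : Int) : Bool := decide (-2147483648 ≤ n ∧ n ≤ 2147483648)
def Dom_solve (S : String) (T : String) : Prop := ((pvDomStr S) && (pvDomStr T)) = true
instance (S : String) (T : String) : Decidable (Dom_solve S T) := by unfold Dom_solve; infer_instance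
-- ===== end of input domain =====

-- B precomputes T's first-occurrence index pattern once and compares each window's pattern to it,
-- instead of rebuilding a translated copy of T through a dict for every window (objective: alternative).

-- ===== PORT A =====
-- first-occurrence dedup of a window: the '[ssx.append(x) for x in ss if x not in ssx]' loop
def ddA (ss : List Char) : List Char :=
  ss.foldl (fun acc x => if x ∈ acc then acc else acc ++ [x]) []

-- the body of A's 'for ss in zistr' loop; state = (query, ans)
def stepA (t : List Char) (st : PySem.Dict Char (Option Char) × List Int) (ss : List Char) :
    PySem.Dict Char (Option Char) × List Int :=
  let ssx := ddA ss
  if ssx.length = (PySem.Set.ofList t).length then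
    -- ssx[i]: i enumerates query's keys, always < ssx.length under the guard, so pyGet? is 'some' (IndexError unreachable)
    let q := (PySem.List.enumerate st.1.keys 0).foldl
        (fun q ik => q.insert ik.2 (PySem.List.pyGet? ssx ik.1)) st.1
    let nw := t.map (fun x => q.getD x none)
    (q, st.2 ++ [if ss.map some = nw then (1 : Int) else 0])
  else st

def solve (S : String) (T : String) : Int :=
  let s := S.toList
  let t := T.toList
  let zistr := (PySem.List.pyRange 0 ((s.length : Int) - (t.length : Int) + 1) 1).map
      (fun i => PySem.List.slice s (some i) (some (i + (t.length : Int))))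
  let query0 : PySem.Dict Char (Option Char) :=
      t.foldl (fun q k => if q.contains k then q else q.insert k none) PySem.Dict.empty
  (zistr.foldl (stepA t) (query0, [])).2.sum

-- ===== PORT B =====
-- body of pattern's 'for c in s' loop; state = (seen, out)
def patternStep (st : List Char × List Int) (c : Char) : List Char × List Int :=
  let seen := if c ∈ st.1 then st.1 else st.1 ++ [c]
  -- seen.index(c): c is always a member of seen, so index? is 'some' (ValueError unreachable)
  (seen, st.2 ++ [(((PySem.List.index? seen c).getD 0 : Nat) : Int)])

def pattern (s : List Char) : List Int := (s.foldl patternStep ([], [])).2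

def solve_alt (S : String) (T : String) : Int :=
  let s := S.toList
  let t := T.toList
  let pt := pattern t
  ((PySem.List.pyRange 0 ((s.length : Int) - (t.length : Int) + 1) 1).map
    (fun i => if pattern (PySem.List.slice s (some i) (some (i + (t.length : Int)))) = pt
              then (1 : Int) else 0)).sum

-- ===== PRECONDITION & SPEC =====
def Spec_solve (S : String) (T : String) (out : Int) : Prop := out = solve_alt S T
instance (S : String) (T : String) (out : Int) : Decidable (Spec_solve S T out) := by unfold Spec_solve; infer_instance

-- ===== CLAIM (what is proved, stated in full; the proofs are below) =====
def Claim_equal_solve : Prop := ∀ (S : String) (T : String), Dom_solve S T → Spec_solve S T (solve S T)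

-- ===== LEMMAS AND PROOFS =====

lemma add_mem_eq (acc : List Char) (x : Char) :
    (if x ∈ acc then acc else acc ++ [x]) = PySem.Set.add acc x := by
  by_cases h : x ∈ acc <;> simp [PySem.Set.add, h]

lemma set_add_of_mem {acc : List Char} {x : Char} (h : x ∈ acc) : PySem.Set.add acc x = acc := by
  simp [PySem.Set.add, h]

lemma set_add_of_not_mem {acc : List Char} {x : Char} (h : x ∉ acc) :
    PySem.Set.add acc x = acc ++ [x] := by
  simp [PySem.Set.add, h]

lemma dd_eq_dedup (ss : List Char) : ddA ss = PySem.List.dedup ss := by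
  have h : ∀ (l acc : List Char),
      l.foldl (fun acc x => if x ∈ acc then acc else acc ++ [x]) acc = l.foldl PySem.Set.add acc := by
    intro l
    induction l with
    | nil => intro acc; rfl
    | cons c l ih => intro acc; simp only [List.foldl_cons, add_mem_eq]; try exact ih _
  simp [ddA, h, PySem.List.dedup_eq_ofList, PySem.Set.ofList_eq_foldl]

lemma prefix_foldl_add (l : List Char) (acc : List Char) : acc <+: l.foldl PySem.Set.add acc := by
  induction l generalizing acc with
  | nil => exact List.prefix_refl _
  | cons c l ih =>
    refine List.IsPrefix.trans ?_ (ih (PySem.Set.add acc c))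
    by_cases h : c ∈ acc
    · rw [set_add_of_mem h]
    · rw [set_add_of_not_mem h]; exact List.prefix_append _ _

lemma idxOf_prefix {l L : List Char} (h : l <+: L) {c : Char} (hc : c ∈ l) :
    L.idxOf c = l.idxOf c := by
  obtain ⟨r, rfl⟩ := h
  exact List.idxOf_append_of_mem hc

lemma idx_getD (l : List Char) (c : Char) (hc : c ∈ l) :
    (((PySem.List.index? l c).getD 0 : Nat) : Int) = (l.idxOf c : Int) := by
  induction l with
  | nil => cases hc
  | cons a l ih =>
    by_cases h : a = c
    · subst h
      rw [PySem.List.index?_cons_self]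
      simp
    · have hm : c ∈ l := by
        rcases List.mem_cons.mp hc with h' | h'
        · exact absurd h'.symm h
        · exact h'
      rw [PySem.List.index?_cons_of_ne l h, List.idxOf_cons_ne l h]
      have hs : (PySem.List.index? l c).isSome := (PySem.List.index?_isSome_iff _ _).mpr hm
      obtain ⟨k, hk⟩ := Option.isSome_iff_exists.mp hs
      have := ih hm
      rw [hk] at this ⊢
      simp at this ⊢
      omega

lemma patternAux (s : List Char) : ∀ (e : List Char) (out : List Int),
    s.foldl patternStep (e, out) =
      (s.foldl PySem.Set.add e,
       out ++ s.map (fun c => (((s.foldl PySem.Set.add e).idxOf c : Nat) : Int))) := by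
  induction s with
  | nil => intro e out; simp
  | cons c s ih =>
    intro e out
    have hmem : c ∈ PySem.Set.add e c := (PySem.Set.mem_add e c c).mpr (Or.inr rfl)
    have hstep : patternStep (e, out) c =
        (PySem.Set.add e c, out ++ [((PySem.Set.add e c).idxOf c : Int)]) := by
      simp only [patternStep, add_mem_eq]
      rw [idx_getD _ _ hmem]
    rw [List.foldl_cons, hstep, ih]
    have hpre : PySem.Set.add e c <+: s.foldl PySem.Set.add (PySem.Set.add e c) :=
      prefix_foldl_add s _
    have hidx : (s.foldl PySem.Set.add (PySem.Set.add e c)).idxOf c = (PySem.Set.add e c).idxOf c :=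
      idxOf_prefix hpre hmem
    simp [hidx]

lemma pattern_eq (s : List Char) :
    pattern s = s.map (fun c => (((PySem.List.dedup s).idxOf c : Nat) : Int)) := by
  have h : PySem.List.dedup s = s.foldl PySem.Set.add [] := by
    simp [PySem.List.dedup_eq_ofList, PySem.Set.ofList_eq_foldl]
  rw [pattern, patternAux s [] [], h]
  simp

lemma mem_pattern (s : List Char) (k : Nat) :
    ((k : Int) ∈ pattern s) ↔ k < (PySem.List.dedup s).length := by
  rw [pattern_eq]
  simp only [List.mem_map]
  constructor
  · rintro ⟨c, hc, hk⟩
    have : (PySem.List.dedup s).idxOf c = k := by exact_mod_cast hk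
    rw [← this]
    exact List.idxOf_lt_length_of_mem ((PySem.List.mem_dedup _ _).mpr hc)
  · intro hk
    refine ⟨(PySem.List.dedup s)[k], (PySem.List.mem_dedup _ _).mp (List.getElem_mem hk), ?_⟩
    rw [List.Nodup.idxOf_getElem (PySem.List.nodup_dedup s) k hk]

lemma pattern_eq_iff (ss t : List Char) (hl : ss.length = t.length) :
    (pattern ss = pattern t) ↔
      ((PySem.List.dedup ss).length = (PySem.List.dedup t).length ∧
       ss.map some = t.map (fun x =>
         PySem.List.pyGet? (PySem.List.dedup ss) (((PySem.List.dedup t).idxOf x : Nat) : Int))) := by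
  constructor
  · intro hp
    have key : ∀ k : Nat, k < (PySem.List.dedup ss).length ↔ k < (PySem.List.dedup t).length := by
      intro k; rw [← mem_pattern, hp, mem_pattern]
    have hlen : (PySem.List.dedup ss).length = (PySem.List.dedup t).length := by
      have h1 := key (PySem.List.dedup ss).length
      have h2 := key (PySem.List.dedup t).length
      omega
    refine ⟨hlen, ?_⟩
    apply List.ext_getElem (by simp [hl])
    intro i hi1 hi2
    simp only [List.getElem_map]
    have hls : i < ss.length := by simpa using hi1
    have hlt : i < t.length := by simpa using hi2
    have htm : t[i] ∈ PySem.List.dedup t := (PySem.List.mem_dedup _ _).mpr (List.getElem_mem hlt)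
    have hsm : ss[i] ∈ PySem.List.dedup ss := (PySem.List.mem_dedup _ _).mpr (List.getElem_mem hls)
    have hidx : (PySem.List.dedup t).idxOf t[i] < (PySem.List.dedup ss).length := by
      rw [hlen]; exact List.idxOf_lt_length_of_mem htm
    rw [pattern_eq, pattern_eq] at hp
    have hpi := List.getElem_of_eq hp (by simpa using hls)
    simp only [List.getElem_map] at hpi
    have hk : (PySem.List.dedup ss).idxOf ss[i] = (PySem.List.dedup t).idxOf t[i] := by
      exact_mod_cast hpi
    rw [PySem.List.pyGet?_natCast, List.getElem?_eq_getElem hidx]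
    have h3 := List.getElem_idxOf (xs := PySem.List.dedup ss) (List.idxOf_lt_length_of_mem hsm)
    simp only [hk] at h3
    rw [h3]
  · rintro ⟨hlen, hC⟩
    rw [pattern_eq, pattern_eq]
    apply List.ext_getElem (by simp [hl])
    intro i hi1 hi2
    simp only [List.getElem_map]
    have hls : i < ss.length := by simpa using hi1
    have hlt : i < t.length := by simpa using hi2
    have htm : t[i] ∈ PySem.List.dedup t := (PySem.List.mem_dedup _ _).mpr (List.getElem_mem hlt)
    have hidx : (PySem.List.dedup t).idxOf t[i] < (PySem.List.dedup ss).length := by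
      rw [hlen]; exact List.idxOf_lt_length_of_mem htm
    have hCi := List.getElem_of_eq hC (by simpa using hls)
    simp only [List.getElem_map] at hCi
    rw [PySem.List.pyGet?_natCast, List.getElem?_eq_getElem hidx] at hCi
    have hval : ss[i] = (PySem.List.dedup ss)[(PySem.List.dedup t).idxOf t[i]] := by
      exact Option.some.inj hCi
    rw [hval, List.Nodup.idxOf_getElem (PySem.List.nodup_dedup ss) _ hidx]

lemma window_indicator (ss t : List Char) (hl : ss.length = t.length) :
    (if (PySem.List.dedup ss).length = (PySem.List.dedup t).length then
       (if ss.map some = t.map (fun x =>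
            PySem.List.pyGet? (PySem.List.dedup ss) (((PySem.List.dedup t).idxOf x : Nat) : Int))
        then (1 : Int) else 0)
     else 0) = (if pattern ss = pattern t then (1 : Int) else 0) := by
  have hiff := pattern_eq_iff ss t hl
  by_cases hp : pattern ss = pattern t
  · obtain ⟨h1, h2⟩ := hiff.mp hp
    rw [if_pos h1, if_pos h2, if_pos hp]
  · rw [if_neg hp]
    split_ifs with h1 h2
    · exact absurd (hiff.mpr ⟨h1, h2⟩) hp
    · rfl
    · rfl

lemma keys_query0 (t : List Char) :
    (t.foldl (fun q k => if q.contains k then q else q.insert k none)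
        (PySem.Dict.empty : PySem.Dict Char (Option Char))).keys = PySem.List.dedup t := by
  have aux : ∀ (l : List Char) (q : PySem.Dict Char (Option Char)),
      (l.foldl (fun q k => if q.contains k then q else q.insert k none) q).keys =
        l.foldl PySem.Set.add q.keys := by
    intro l
    induction l with
    | nil => intro q; rfl
    | cons k l ih =>
      intro q
      simp only [List.foldl_cons]
      by_cases h : q.contains k
      · have hmem : k ∈ q.keys := (PySem.Dict.contains_iff_mem_keys _ _).mp h
        rw [if_pos h, ih, set_add_of_mem hmem]
      · have hmem : k ∉ q.keys := fun hm => h ((PySem.Dict.contains_iff_mem_keys _ _).mpr hm)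
        rw [if_neg h, ih, PySem.Dict.keys_insert_of_not_contains q none (by simpa using h),
          set_add_of_not_mem hmem]
  rw [aux]
  simp [PySem.List.dedup_eq_ofList, PySem.Set.ofList_eq_foldl]

lemma getD_foldl_insert_of_notmem (f : Int → Option Char) (x : Char) :
    ∀ (ps : List (Int × Char)) (q : PySem.Dict Char (Option Char)),
      (∀ p ∈ ps, p.2 ≠ x) →
      (ps.foldl (fun q ik => q.insert ik.2 (f ik.1)) q).getD x none = q.getD x none := by
  intro ps
  induction ps with
  | nil => intro q _; rfl
  | cons p ps ih =>
    intro q h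
    simp only [List.foldl_cons]
    rw [ih _ (fun p' hp' => h p' (List.mem_cons_of_mem _ hp')),
      PySem.Dict.getD_insert_of_ne _ _ _ (fun he => h p (by simp) he.symm)]

lemma keys_foldl_insert_mem (f : Int → Option Char) :
    ∀ (ps : List (Int × Char)) (q : PySem.Dict Char (Option Char)),
      (∀ p ∈ ps, p.2 ∈ q.keys) →
      (ps.foldl (fun q ik => q.insert ik.2 (f ik.1)) q).keys = q.keys := by
  intro ps
  induction ps with
  | nil => intro q _; rfl
  | cons p ps ih =>
    intro q h
    simp only [List.foldl_cons]
    have hc : q.contains p.2 := (PySem.Dict.contains_iff_mem_keys _ _).mpr (h p (by simp))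
    have hk : (q.insert p.2 (f p.1)).keys = q.keys := PySem.Dict.keys_insert_of_contains q (f p.1) hc
    rw [ih _ (fun p' hp' => by rw [hk]; exact h p' (List.mem_cons_of_mem _ hp')), hk]

lemma snd_mem_enumerate {α : Type} (l : List α) (s : Int) (p : Int × α) (hp : p ∈ PySem.List.enumerate l s) :
    p.2 ∈ l := by
  obtain ⟨k, hk, rfl⟩ := (PySem.List.mem_enumerate_iff _ _ _).mp hp
  exact List.getElem_mem hk

lemma getD_enum_fold (f : Int → Option Char) (x : Char) :
    ∀ (l : List Char) (j0 : Int) (q : PySem.Dict Char (Option Char)), l.Nodup → x ∈ l →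
      ((PySem.List.enumerate l j0).foldl (fun q ik => q.insert ik.2 (f ik.1)) q).getD x none =
        f (j0 + (l.idxOf x : Int)) := by
  intro l
  induction l with
  | nil => intro j0 q _ hx; cases hx
  | cons k l ih =>
    intro j0 q hnd hx
    rw [PySem.List.enumerate_cons, List.foldl_cons]
    by_cases h : x = k
    · subst h
      have hnotin : x ∉ l := (List.nodup_cons.mp hnd).1
      rw [getD_foldl_insert_of_notmem f x _ _
          (fun p hp he => hnotin (he ▸ snd_mem_enumerate l _ p hp)),
        PySem.Dict.getD_insert_self]
      simp
    · have hm : x ∈ l := by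
        rcases List.mem_cons.mp hx with h' | h'
        · exact absurd h' h
        · exact h'
      rw [ih (j0 + 1) _ (List.nodup_cons.mp hnd).2 hm,
        List.idxOf_cons_ne l (fun he => h he.symm)]
      congr 1
      push_cast
      ring

lemma fold_sum (t : List Char) :
    ∀ (ws : List (List Char)) (q : PySem.Dict Char (Option Char)) (ans : List Int),
      q.keys = PySem.List.dedup t → (∀ ss ∈ ws, ss.length = t.length) →
      ((ws.foldl (stepA t) (q, ans)).2).sum =
        ans.sum + (ws.map (fun ss => if pattern ss = pattern t then (1 : Int) else 0)).sum := by
  intro ws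
  induction ws with
  | nil => intro q ans _ _; simp
  | cons ss ws ih =>
    intro q ans hq hlen
    have hl : ss.length = t.length := hlen ss List.mem_cons_self
    have hlen' : ∀ s' ∈ ws, s'.length = t.length := fun s' hs' => hlen s' (List.mem_cons_of_mem _ hs')
    rw [List.foldl_cons]
    have hsetT : (PySem.Set.ofList t : List Char) = PySem.List.dedup t := by
      simp [PySem.List.dedup_eq_ofList]
    by_cases hc : (PySem.List.dedup ss).length = (PySem.List.dedup t).length
    · have hq1keys : ∀ p ∈ PySem.List.enumerate q.keys 0, p.2 ∈ q.keys :=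
        fun p hp => snd_mem_enumerate _ _ p hp
      have hstep : stepA t (q, ans) ss =
          ((PySem.List.enumerate q.keys 0).foldl
             (fun q ik => q.insert ik.2 (PySem.List.pyGet? (ddA ss) ik.1)) q,
           ans ++ [if ss.map some = t.map (fun x =>
             PySem.List.pyGet? (PySem.List.dedup ss) (((PySem.List.dedup t).idxOf x : Nat) : Int))
             then (1 : Int) else 0]) := by
        simp only [stepA, dd_eq_dedup, hsetT]
        rw [if_pos hc]
        have hnw : t.map (fun x =>
            ((PySem.List.enumerate q.keys 0).foldl
              (fun q ik => q.insert ik.2 (PySem.List.pyGet? (PySem.List.dedup ss) ik.1)) q).getD x none) =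
            t.map (fun x =>
              PySem.List.pyGet? (PySem.List.dedup ss) (((PySem.List.dedup t).idxOf x : Nat) : Int)) := by
          apply List.map_congr_left
          intro x hx
          have hxk : x ∈ q.keys := by rw [hq]; exact (PySem.List.mem_dedup _ _).mpr hx
          have hnd : q.keys.Nodup := by rw [hq]; exact PySem.List.nodup_dedup t
          rw [getD_enum_fold _ x q.keys 0 q hnd hxk]
          simp [hq]
        rw [hnw]
      rw [hstep, ih _ _ (by rw [keys_foldl_insert_mem _ _ _ hq1keys]; exact hq) hlen']
      rw [List.map_cons, List.sum_cons, List.sum_append]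
      have hw := window_indicator ss t hl
      rw [if_pos hc] at hw
      rw [hw]
      simp
      ring
    · have hstep : stepA t (q, ans) ss = (q, ans) := by
        simp only [stepA, dd_eq_dedup, hsetT]
        rw [if_neg hc]
      rw [hstep, ih _ _ hq hlen']
      have hw := window_indicator ss t hl
      rw [if_neg hc] at hw
      rw [List.map_cons, List.sum_cons, ← hw]
      ring

lemma slice_len (s : List Char) (i : Int) (m : Nat) (h0 : 0 ≤ i) (h1 : i + m ≤ s.length) :
    (PySem.List.slice s (some i) (some (i + m))).length = m := by
  obtain ⟨j, rfl⟩ := Int.eq_ofNat_of_zero_le h0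
  rw [PySem.List.slice_natCast_add]
  have : j + m ≤ s.length := by exact_mod_cast h1
  simp [List.length_take, List.length_drop]
  omega

-- ===== VERDICT (by name: the statement is the Claim_ definition above) =====
theorem solve_spec : Claim_equal_solve := by
  unfold Claim_equal_solve Spec_solve
  intro S T _
  simp only [solve, solve_alt]
  rw [fold_sum T.toList _ _ _ (keys_query0 T.toList) ?_]
  · rw [List.map_map]
    simp [Function.comp_def]
  · intro ss hss
    obtain ⟨i, hi, rfl⟩ := List.mem_map.mp hss
    have hmem := PySem.List.mem_pyRange_one.mp hi
    exact slice_len S.toList i T.toList.length hmem.1 (by omega)
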